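-- pv_equiv track=rewrite | github.com/alf239/AoC2022 | day_10.py | part2
-- ===== SOURCE A (Python) =====
-- def parse(ss):
--     return [s.split(" ") for s in ss.splitlines()]
--
-- def check_signal2(sprite, pc):
--     return sprite <= pc % 40 < (sprite + 3)
--
-- def part2(s):
--     cmds = parse(s)
--     pc = 0
--     x = 0
--     crt = set()
--     for cmd in cmds:
--         if len(cmd) == 1:
--             if check_signal2(x, pc):
--                 crt.add(pc)
--             pc += 1
--         if len(cmd) == 2:
--             if check_signal2(x, pc):
--                 crt.add(pc)
--             pc += 1
--             if check_signal2(x, pc):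
--                 crt.add(pc)
--             pc += 1
--             x += int(cmd[1])
--     return crt
-- ===== SOURCE B (Python) =====
-- def part2(s):
--     # Run-length encode the register timeline: one (start, length, x) run per
--     # stretch of cycles with a constant register, then emit each run's lit
--     # pixels by interval arithmetic (intersecting the run with the sprite's
--     # column window per CRT row) instead of testing every cycle.
--     runs = []
--     start = 0
--     length = 0
--     x = 0
--     for line in s.splitlines():
--         cmd = line.split(" ")
--         if len(cmd) == 1:
--             length += 1
--         elif len(cmd) == 2:
--             runs.append((start, length + 2, x))
--             start += length + 2
--             length = 0
--             x += int(cmd[1])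
--     if length:
--         runs.append((start, length, x))
--     crt = set()
--     for a, n, xv in runs:
--         lo = max(xv, 0)
--         hi = min(xv + 3, 40)
--         for k in range(a // 40, (a + n - 1) // 40 + 1):
--             for i in range(max(a, 40 * k + lo), min(a + n, 40 * k + hi)):
--                 crt.add(i)
--     return crt
-- ===== Notes on version B (the rewrite author's own statement) =====
-- stated objective: alternative
-- what changed: A tests the sprite-overlap condition at every single cycle inside one interleaved CPU/CRT loop; B run-length encodes the register timeline into constant-register runs and emits each run's lit pixels by intersecting the run with the sprite's column window per CRT row (interval arithmetic), never testing individual cycles.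
import Mathlib
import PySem

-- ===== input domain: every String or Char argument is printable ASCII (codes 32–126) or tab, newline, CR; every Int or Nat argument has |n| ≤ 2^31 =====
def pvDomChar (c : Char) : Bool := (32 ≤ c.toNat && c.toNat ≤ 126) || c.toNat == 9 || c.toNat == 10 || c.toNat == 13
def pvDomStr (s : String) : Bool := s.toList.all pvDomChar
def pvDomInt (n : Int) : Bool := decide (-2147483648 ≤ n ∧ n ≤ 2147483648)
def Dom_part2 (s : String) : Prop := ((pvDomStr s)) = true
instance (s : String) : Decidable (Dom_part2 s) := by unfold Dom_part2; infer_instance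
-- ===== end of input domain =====

-- B replaces A's per-cycle sprite test inside one interleaved CPU/CRT loop by a run-length
-- encoding of the register timeline plus per-run/per-row interval arithmetic (objective: alternative).

-- ===== PORT A =====
-- parse: [s.split(" ") for s in ss.splitlines()]  (sep " " is nonempty, so split? is always some; getD never fires)
def pvParse (s : String) : List (List String) :=
  (PySem.Str.splitlines s).map (fun l => (PySem.Str.split? l " ").getD [])

-- check_signal2(sprite, pc): sprite <= pc % 40 < sprite + 3
def pvCheckSignal2 (sprite pc : Int) : Bool :=
  decide (sprite ≤ PySem.Int.mod pc 40 ∧ PySem.Int.mod pc 40 < sprite + 3)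

-- one iteration of A's loop over a command, state (pc, x, crt)
def pvStepA (st : Int × Int × PySem.Set Int) (cmd : List String) : Int × Int × PySem.Set Int :=
  let st1 :=
    if cmd.length = 1 then
      (st.1 + 1, st.2.1,
       if pvCheckSignal2 st.2.1 st.1 then PySem.Set.add st.2.2 st.1 else st.2.2)
    else st
  if cmd.length = 2 then
    let crt1 := if pvCheckSignal2 st1.2.1 st1.1 then PySem.Set.add st1.2.2 st1.1 else st1.2.2
    let crt2 := if pvCheckSignal2 st1.2.1 (st1.1 + 1) then PySem.Set.add crt1 (st1.1 + 1) else crt1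
    -- int(cmd[1]): ValueError (ofStr? = none) is excluded by Pre_part2
    (st1.1 + 2, st1.2.1 + (PySem.Int.ofStr? (cmd.getD 1 "")).getD 0, crt2)
  else st1

def part2 (s : String) : List Int :=
  ((pvParse s).foldl pvStepA (0, 0, PySem.Set.empty)).2.2

-- ===== PORT B =====
-- pass 1 step: state (runs, start, length, x); a noop extends the pending run, an addx
-- closes the pending run two cycles later and updates the register
def pvRunStep (st : List (Int × Int × Int) × Int × Int × Int) (cmd : List String) :
    List (Int × Int × Int) × Int × Int × Int :=
  if cmd.length = 1 then (st.1, st.2.1, st.2.2.1 + 1, st.2.2.2)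
  else if cmd.length = 2 then
    (st.1 ++ [(st.2.1, st.2.2.1 + 2, st.2.2.2)], st.2.1 + st.2.2.1 + 2, 0,
     st.2.2.2 + (PySem.Int.ofStr? (cmd.getD 1 "")).getD 0)
  else st

-- pass 2 body: lit pixels of one run (a, n, xv) by row/column interval intersection
def pvEmitRun (crt : PySem.Set Int) (r : Int × Int × Int) : PySem.Set Int :=
  let lo := max r.2.2 0
  let hi := min (r.2.2 + 3) 40
  (PySem.List.pyRange (PySem.Int.floordiv r.1 40)
      (PySem.Int.floordiv (r.1 + r.2.1 - 1) 40 + 1) 1).foldl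
    (fun crt k =>
      (PySem.List.pyRange (max r.1 (40 * k + lo)) (min (r.1 + r.2.1) (40 * k + hi)) 1).foldl
        PySem.Set.add crt) crt

def part2_alt (s : String) : List Int :=
  let st := ((PySem.Str.splitlines s).map (fun l => (PySem.Str.split? l " ").getD [])).foldl
    pvRunStep ([], 0, 0, 0)
  let runs := if st.2.2.1 ≠ 0 then st.1 ++ [(st.2.1, st.2.2.1, st.2.2.2)] else st.1
  runs.foldl pvEmitRun PySem.Set.empty

-- ===== PRECONDITION & SPEC =====
-- Pre_ excludes exactly the inputs on which Python's int(cmd[1]) raises ValueError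
-- (a line splitting into two tokens whose second token is not an int literal); both A and B raise there.
def Pre_part2 (s : String) : Prop :=
  ∀ cmd ∈ (PySem.Str.splitlines s).map (fun l => (PySem.Str.split? l " ").getD []),
    cmd.length = 2 → (PySem.Int.ofStr? (cmd.getD 1 "")).isSome
instance (s : String) : Decidable (Pre_part2 s) := by unfold Pre_part2; infer_instance

def pvWitness_part2 : String := "noop\naddx 3\naddx -5\nnoop"

def Spec_part2 (s : String) (out : List Int) : Prop := out = part2_alt s
instance (s : String) (out : List Int) : Decidable (Spec_part2 s out) := by unfold Spec_part2; infer_instance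

-- ===== CLAIM (what is proved, stated in full; the proofs are below) =====
def Claim_equal_part2 : Prop := ∀ (s : String), Dom_part2 s → Pre_part2 s → Spec_part2 s (part2 s)

-- ===== LEMMAS AND PROOFS =====

-- the per-cycle register table produced from commands `cmds` starting with register value `x`
def pvT (cmds : List (List String)) (x : Int) : List Int :=
  match cmds with
  | [] => []
  | cmd :: rest =>
    if cmd.length = 1 then x :: pvT rest x
    else if cmd.length = 2 then
      x :: x :: pvT rest (x + (PySem.Int.ofStr? (cmd.getD 1 "")).getD 0)
    else pvT rest x

-- the lit pixels contributed by a table, cycles numbered from pc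
def pvPix (pc : Int) (xs : List Int) : List Int :=
  match xs with
  | [] => []
  | xv :: rest => (if pvCheckSignal2 xv pc then [pc] else []) ++ pvPix (pc + 1) rest

-- the runs B's pass 1 produces from `cmds`, given pending run (start a, length l, register x)
def pvRuns (cmds : List (List String)) (a l x : Int) : List (Int × Int × Int) :=
  match cmds with
  | [] => if l ≠ 0 then [(a, l, x)] else []
  | cmd :: rest =>
    if cmd.length = 1 then pvRuns rest a (l + 1) x
    else if cmd.length = 2 then
      (a, l + 2, x) :: pvRuns rest (a + l + 2) 0 (x + (PySem.Int.ofStr? (cmd.getD 1 "")).getD 0)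
    else pvRuns rest a l x

-- lit pixels of run r in CRT row k
def pvRowPix (r : Int × Int × Int) (k : Int) : List Int :=
  PySem.List.pyRange (max r.1 (40 * k + max r.2.2 0)) (min (r.1 + r.2.1) (40 * k + min (r.2.2 + 3) 40)) 1

-- lit pixels of run r, all rows
def pvRunPix (r : Int × Int × Int) : List Int :=
  (PySem.List.pyRange (PySem.Int.floordiv r.1 40)
      (PySem.Int.floordiv (r.1 + r.2.1 - 1) 40 + 1) 1).flatMap (pvRowPix r)

theorem pvPix_mem {pc : Int} {xs : List Int} {a : Int} (h : a ∈ pvPix pc xs) :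
    pc ≤ a ∧ a < pc + xs.length := by
  induction xs generalizing pc with
  | nil => simp [pvPix] at h
  | cons xv rest ih =>
    simp only [pvPix, List.mem_append] at h
    rcases h with h | h
    · split at h
      · simp at h
        subst h
        simp only [List.length_cons]
        omega
      · simp at h
    · have := ih h; simp; omega

theorem pvAdd_fresh (crt : PySem.Set Int) (a : Int) (h : a ∉ crt) :
    PySem.Set.add crt a = crt ++ [a] := by
  simp [PySem.Set.add, PySem.Set.contains, h]

theorem pvStepA_one {cmd : List String} (pc x : Int) (crt : PySem.Set Int)
    (h : cmd.length = 1) :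
    pvStepA (pc, x, crt) cmd =
      (pc + 1, x, if pvCheckSignal2 x pc then PySem.Set.add crt pc else crt) := by
  simp [pvStepA, h]

theorem pvStepA_two {cmd : List String} (pc x : Int) (crt : PySem.Set Int)
    (h : cmd.length = 2) :
    pvStepA (pc, x, crt) cmd =
      (pc + 2, x + (PySem.Int.ofStr? (cmd.getD 1 "")).getD 0,
       (if pvCheckSignal2 x (pc + 1) then
          PySem.Set.add (if pvCheckSignal2 x pc then PySem.Set.add crt pc else crt) (pc + 1)
        else if pvCheckSignal2 x pc then PySem.Set.add crt pc else crt)) := by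
  simp [pvStepA, h]

theorem pvStepA_other {cmd : List String} (pc x : Int) (crt : PySem.Set Int)
    (h1 : ¬ cmd.length = 1) (h2 : ¬ cmd.length = 2) :
    pvStepA (pc, x, crt) cmd = (pc, x, crt) := by
  simp [pvStepA, h1, h2]

-- A's interleaved fold appends exactly the pixels of the per-cycle table
theorem pvFoldA_eq (cmds : List (List String)) (pc x : Int) (crt : PySem.Set Int)
    (hlt : ∀ a ∈ crt, a < pc) :
    (cmds.foldl pvStepA (pc, x, crt)).2.2 = crt ++ pvPix pc (pvT cmds x) := by
  induction cmds generalizing pc x crt with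
  | nil => simp [pvT, pvPix]
  | cons cmd rest ih =>
    rw [List.foldl_cons]
    by_cases h1 : cmd.length = 1
    · have hfresh : pc ∉ crt := fun h => absurd (hlt _ h) (by omega)
      have hstep : (if pvCheckSignal2 x pc then PySem.Set.add crt pc else crt) =
          crt ++ (if pvCheckSignal2 x pc then [pc] else []) := by
        split
        · exact pvAdd_fresh crt pc hfresh
        · simp
      have hlt' : ∀ a ∈ crt ++ (if pvCheckSignal2 x pc then [pc] else []), a < pc + 1 := by
        intro a ha
        rcases List.mem_append.mp ha with h | h
        · have := hlt a h; omega
        · split at h <;> simp at h; omega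
      rw [pvStepA_one pc x crt h1, hstep, ih (pc + 1) x _ hlt']
      simp only [pvT, h1, if_pos, pvPix]
      simp
    · by_cases h2 : cmd.length = 2
      · have hf1 : pc ∉ crt := fun h => absurd (hlt _ h) (by omega)
        have hstep1 : (if pvCheckSignal2 x pc then PySem.Set.add crt pc else crt) =
            crt ++ (if pvCheckSignal2 x pc then [pc] else []) := by
          split
          · exact pvAdd_fresh crt pc hf1
          · simp
        have hlt1 : ∀ a ∈ crt ++ (if pvCheckSignal2 x pc then [pc] else []), a < pc + 1 := by
          intro a ha
          rcases List.mem_append.mp ha with h | h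
          · have := hlt a h; omega
          · split at h <;> simp at h; omega
        have hf2 : pc + 1 ∉ crt ++ (if pvCheckSignal2 x pc then [pc] else []) :=
          fun h => absurd (hlt1 _ h) (by omega)
        have hstep2 :
            (if pvCheckSignal2 x (pc + 1) then
               PySem.Set.add (crt ++ (if pvCheckSignal2 x pc then [pc] else [])) (pc + 1)
             else crt ++ (if pvCheckSignal2 x pc then [pc] else [])) =
            (crt ++ (if pvCheckSignal2 x pc then [pc] else [])) ++
              (if pvCheckSignal2 x (pc + 1) then [pc + 1] else []) := by
          split
          · exact pvAdd_fresh _ (pc + 1) hf2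
          · simp
        have hlt2 : ∀ a ∈ (crt ++ (if pvCheckSignal2 x pc then [pc] else [])) ++
            (if pvCheckSignal2 x (pc + 1) then [pc + 1] else []), a < pc + 2 := by
          intro a ha
          rcases List.mem_append.mp ha with h | h
          · have := hlt1 a h; omega
          · split at h <;> simp at h; omega
        rw [pvStepA_two pc x crt h2, hstep1, hstep2,
            ih (pc + 2) (x + (PySem.Int.ofStr? (cmd.getD 1 "")).getD 0) _ hlt2]
        have hT : pvT (cmd :: rest) x =
            x :: x :: pvT rest (x + (PySem.Int.ofStr? (cmd.getD 1 "")).getD 0) := by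
          simp [pvT, h2]
        rw [hT]
        simp only [pvPix]
        simp [show pc + 1 + 1 = pc + 2 by ring]
      · rw [pvStepA_other pc x crt h1 h2, ih pc x crt hlt]
        have hT : pvT (cmd :: rest) x = pvT rest x := by simp [pvT, h1, h2]
        rw [hT]

-- B's pass-1 fold, with the trailing flush, computes pvRuns
theorem pvRunsFold (cmds : List (List String)) (rs : List (Int × Int × Int)) (a l x : Int) :
    (if (cmds.foldl pvRunStep (rs, a, l, x)).2.2.1 ≠ 0 then
       (cmds.foldl pvRunStep (rs, a, l, x)).1 ++
         [((cmds.foldl pvRunStep (rs, a, l, x)).2.1,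
           (cmds.foldl pvRunStep (rs, a, l, x)).2.2.1,
           (cmds.foldl pvRunStep (rs, a, l, x)).2.2.2)]
     else (cmds.foldl pvRunStep (rs, a, l, x)).1) =
    rs ++ pvRuns cmds a l x := by
  induction cmds generalizing rs a l x with
  | nil =>
    simp only [List.foldl_nil, pvRuns]
    split <;> simp_all
  | cons cmd rest ih =>
    rw [List.foldl_cons]
    by_cases h1 : cmd.length = 1
    · simp only [pvRunStep, h1, if_pos, pvRuns]
      rw [ih]
    · by_cases h2 : cmd.length = 2
      · simp only [pvRunStep, pvRuns, h2]
        rw [ih]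
        simp
      · simp only [pvRunStep, pvRuns, h1, h2, reduceIte]
        rw [ih]

-- membership in pvPix of a constant table
theorem pvPix_replicate_mem (m : Nat) (pc x i : Int) :
    i ∈ pvPix pc (List.replicate m x) ↔
      pc ≤ i ∧ i < pc + m ∧ x ≤ PySem.Int.mod i 40 ∧ PySem.Int.mod i 40 < x + 3 := by
  induction m generalizing pc with
  | zero => simp [pvPix]; omega
  | succ m ih =>
    simp only [List.replicate_succ, pvPix, List.mem_append, ih]
    constructor
    · rintro (h | h)
      · split at h
        · rename_i hc
          simp at h
          subst h
          simp only [pvCheckSignal2, decide_eq_true_eq] at hc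
          push_cast
          exact ⟨le_refl _, by omega, hc.1, hc.2⟩
        · simp at h
      · push_cast at h ⊢
        omega
    · intro h
      by_cases hi : i = pc
      · subst hi
        left
        have : pvCheckSignal2 x i = true := by
          simp only [pvCheckSignal2, decide_eq_true_eq]
          exact ⟨h.2.2.1, h.2.2.2⟩
        simp [this]
      · right
        push_cast at h ⊢
        omega

-- membership in B's per-run pixel list
theorem pvRunPix_mem (a n x i : Int) :
    i ∈ pvRunPix (a, n, x) ↔
      a ≤ i ∧ i < a + n ∧ x ≤ PySem.Int.mod i 40 ∧ PySem.Int.mod i 40 < x + 3 := by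
  have h40 : (0:Int) < 40 := by norm_num
  simp only [pvRunPix, pvRowPix, List.mem_flatMap, PySem.List.mem_pyRange_one,
    PySem.Int.floordiv_eq_ediv_of_pos h40]
  have hmod : PySem.Int.mod i 40 = i % 40 := PySem.Int.mod_eq_emod_of_pos h40
  have hdm : 40 * (i / 40) + i % 40 = i := by
    have := Int.mul_ediv_add_emod i 40; omega
  have hm0 : 0 ≤ i % 40 := Int.emod_nonneg i (by norm_num)
  have hm40 : i % 40 < 40 := Int.emod_lt_of_pos i h40
  constructor
  · rintro ⟨k, ⟨hk1, hk2⟩, hi1, hi2⟩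
    have hge : 40 * k ≤ i := le_trans (by omega) (le_trans (le_max_right _ _) hi1)
    have hlt : i < 40 * k + 40 :=
      lt_of_lt_of_le hi2 (le_trans (min_le_right _ _) (by omega))
    have hk : k = i / 40 := by omega
    subst hk
    rw [hmod]
    constructor
    · exact le_trans (le_max_left _ _) hi1
    refine ⟨lt_of_lt_of_le hi2 (min_le_left _ _), ?_, ?_⟩ <;> omega
  · intro h
    rw [hmod] at h
    refine ⟨i / 40, ⟨?_, ?_⟩, ?_, ?_⟩
    · exact Int.ediv_le_ediv h40 h.1
    · have : i / 40 ≤ (a + n - 1) / 40 := Int.ediv_le_ediv h40 (by omega)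
      omega
    · simp only [max_le_iff]
      omega
    · simp only [lt_min_iff]
      omega

theorem pvPix_pairwise (xs : List Int) (pc : Int) : (pvPix pc xs).Pairwise (· < ·) := by
  induction xs generalizing pc with
  | nil => simp [pvPix]
  | cons xv rest ih =>
    simp only [pvPix]
    rw [List.pairwise_append]
    refine ⟨by split <;> simp, ih (pc + 1), ?_⟩
    intro a ha b hb
    have hb' := (pvPix_mem hb).1
    split at ha <;> simp at ha
    omega

theorem pvFlatPairwise (g : Int → List Int) (ks : List Int) (hks : ks.Pairwise (· < ·))
    (hg : ∀ k, (g k).Pairwise (· < ·))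
    (hb : ∀ k i, i ∈ g k → 40 * k ≤ i ∧ i < 40 * k + 40) :
    (ks.flatMap g).Pairwise (· < ·) := by
  induction ks with
  | nil => simp
  | cons k ks ihk =>
    rw [List.flatMap_cons, List.pairwise_append]
    refine ⟨hg k, ihk (List.Pairwise.of_cons hks), ?_⟩
    intro p hp q hq
    rw [List.mem_flatMap] at hq
    obtain ⟨k', hk', hq⟩ := hq
    have hkk' : k < k' := (List.pairwise_cons.mp hks).1 k' hk'
    have h1 := hb k p hp
    have h2 := hb k' q hq
    omega

theorem pvRunPix_pairwise (r : Int × Int × Int) : (pvRunPix r).Pairwise (· < ·) := by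
  obtain ⟨a, n, x⟩ := r
  simp only [pvRunPix]
  apply pvFlatPairwise
  · exact PySem.List.pairwise_lt_pyRange_one _ _
  · intro k
    exact PySem.List.pairwise_lt_pyRange_one _ _
  · intro k i hi
    simp only [pvRowPix, PySem.List.mem_pyRange_one] at hi
    constructor
    · exact le_trans (by omega) (le_trans (le_max_right _ _) hi.1)
    · exact lt_of_lt_of_le hi.2 (le_trans (min_le_right _ _) (by omega))

-- splitting pvPix over an append
theorem pvPix_append (xs ys : List Int) (pc : Int) :
    pvPix pc (xs ++ ys) = pvPix pc xs ++ pvPix (pc + xs.length) ys := by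
  induction xs generalizing pc with
  | nil => simp [pvPix]
  | cons xv rest ih =>
    simp only [List.cons_append, pvPix, ih, List.length_cons]
    have : pc + 1 + (rest.length : Int) = pc + ((rest.length : Int) + 1) := by ring
    simp [this]

-- the per-run interval arithmetic computes exactly the per-cycle pixels of a constant run
theorem pvRunPix_eq (a n x : Int) (hn : 0 ≤ n) :
    pvRunPix (a, n, x) = pvPix a (List.replicate n.toNat x) := by
  apply List.Pairwise.eq_of_mem_iff (pvRunPix_pairwise _) (pvPix_pairwise _ _)
  intro i
  rw [pvRunPix_mem, pvPix_replicate_mem]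
  have : (n.toNat : Int) = n := Int.toNat_of_nonneg hn
  omega

-- B's run decomposition covers the per-cycle table
theorem pvRunsPix (cmds : List (List String)) (a l x : Int) (hl : 0 ≤ l) :
    (pvRuns cmds a l x).flatMap pvRunPix = pvPix a (List.replicate l.toNat x ++ pvT cmds x) := by
  induction cmds generalizing a l x with
  | nil =>
    simp only [pvRuns, pvT, List.append_nil]
    split
    · simp [pvRunPix_eq a l x hl]
    · rename_i h
      simp at h
      subst h
      simp [pvPix]
  | cons cmd rest ih =>
    by_cases h1 : cmd.length = 1
    · simp only [pvRuns, pvT, h1, if_pos]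
      rw [ih a (l + 1) x (by omega)]
      have : List.replicate (l + 1).toNat x = List.replicate l.toNat x ++ [x] := by
        rw [show (l+1).toNat = l.toNat + 1 by omega, List.replicate_succ']
      rw [this, List.append_assoc]
      rfl
    · by_cases h2 : cmd.length = 2
      · simp only [pvRuns, pvT, h2, show (2:Nat) ≠ 1 from by decide, if_false, if_true, List.flatMap_cons]
        rw [ih (a + l + 2) 0 _ (by omega)]
        rw [pvRunPix_eq a (l + 2) x (by omega)]
        have hrep : List.replicate (l + 2).toNat x = (List.replicate l.toNat x ++ [x, x]) := by
          rw [show (l+2).toNat = l.toNat + 1 + 1 by omega, List.replicate_succ', List.replicate_succ']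
          simp
        rw [show List.replicate l.toNat x ++ x :: x :: pvT rest (x + (PySem.Int.ofStr? (cmd.getD 1 "")).getD 0)
              = (List.replicate l.toNat x ++ [x, x]) ++ pvT rest (x + (PySem.Int.ofStr? (cmd.getD 1 "")).getD 0) by simp]
        rw [pvPix_append, ← hrep, pvPix_append]
        have hlen : ((List.replicate (l + 2).toNat x).length : Int) = l + 2 := by
          simp
          omega
        rw [hlen]
        simp [pvPix, add_assoc]
      · simp only [pvRuns, pvT, h1, h2, reduceIte]
        exact ih a l x hl

-- folding Set.add over a fresh nodup list appends it
theorem pvOfList_nodup (l : List Int) (acc : List Int) (hnd : l.Nodup)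
    (hdisj : ∀ a ∈ l, a ∉ acc) :
    List.foldl PySem.Set.add acc l = acc ++ l := by
  induction l generalizing acc with
  | nil => simp
  | cons a rest ih =>
    rw [List.foldl_cons, pvAdd_fresh acc a (hdisj a (by simp))]
    rw [ih (acc ++ [a]) (List.Nodup.of_cons hnd)]
    · simp
    · intro b hb
      simp only [List.mem_append, List.mem_singleton, not_or]
      exact ⟨hdisj b (by simp [hb]), fun h => (List.nodup_cons.mp hnd).1 (h ▸ hb)⟩

-- generic: a fold whose step appends a fresh block per element flattens
theorem pvFoldAppend {β : Type} (g : β → List Int) (f : List Int → β → List Int)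
    (hf : ∀ acc e, (g e).Nodup → (∀ a ∈ g e, a ∉ acc) → f acc e = acc ++ g e)
    (l : List β) (acc : List Int) (hnd : (l.flatMap g).Nodup)
    (hdisj : ∀ a ∈ l.flatMap g, a ∉ acc) :
    l.foldl f acc = acc ++ l.flatMap g := by
  induction l generalizing acc with
  | nil => simp
  | cons e rest ih =>
    rw [List.flatMap_cons] at hnd hdisj
    have hnd1 : (g e).Nodup := (List.nodup_append.mp hnd).1
    have hnd2 : (rest.flatMap g).Nodup := (List.nodup_append.mp hnd).2.1
    have hcross : ∀ a ∈ g e, a ∉ rest.flatMap g := by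
      intro a ha hb
      exact List.disjoint_of_nodup_append hnd ha hb
    rw [List.foldl_cons, hf acc e hnd1 (fun a ha => hdisj a (by simp [ha])),
        ih (acc ++ g e) hnd2 ?_]
    · simp
    · intro a ha
      simp only [List.mem_append, not_or]
      exact ⟨hdisj a (by simp [ha]), fun h => hcross a h ha⟩

-- pvEmitRun appends the run's fresh pixels
theorem pvEmitRun_eq (crt : PySem.Set Int) (r : Int × Int × Int)
    (hnd : (pvRunPix r).Nodup) (hdisj : ∀ a ∈ pvRunPix r, a ∉ crt) :
    pvEmitRun crt r = crt ++ pvRunPix r := by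
  obtain ⟨a, n, x⟩ := r
  show (PySem.List.pyRange (PySem.Int.floordiv a 40) (PySem.Int.floordiv (a + n - 1) 40 + 1) 1).foldl
      (fun crt k =>
        (PySem.List.pyRange (max a (40 * k + max x 0)) (min (a + n) (40 * k + min (x + 3) 40)) 1).foldl
          PySem.Set.add crt) crt = _
  exact pvFoldAppend (pvRowPix (a, n, x)) _
    (fun acc k hk1 hk2 => pvOfList_nodup _ acc hk1 hk2) _ crt hnd hdisj

-- ===== VERDICT (by name: the statement is the Claim_ definition above) =====
theorem part2_spec : Claim_equal_part2 := by
  intro s _ _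
  show part2 s = part2_alt s
  have hA : part2 s =
      pvPix 0 (pvT ((PySem.Str.splitlines s).map (fun l => (PySem.Str.split? l " ").getD [])) 0) := by
    unfold part2 pvParse
    rw [pvFoldA_eq _ 0 0 PySem.Set.empty (by intro a h; simp [PySem.Set.empty] at h)]
    simp [PySem.Set.empty]
  have hpix : (pvRuns ((PySem.Str.splitlines s).map (fun l => (PySem.Str.split? l " ").getD [])) 0 0 0).flatMap pvRunPix
      = pvPix 0 (pvT ((PySem.Str.splitlines s).map (fun l => (PySem.Str.split? l " ").getD [])) 0) := by
    rw [pvRunsPix _ 0 0 0 (le_refl 0)]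
    simp
  have hnd : ((pvRuns ((PySem.Str.splitlines s).map (fun l => (PySem.Str.split? l " ").getD [])) 0 0 0).flatMap pvRunPix).Nodup := by
    rw [hpix]
    exact (pvPix_pairwise _ _).imp (fun h => ne_of_lt h)
  have hB : part2_alt s =
      pvPix 0 (pvT ((PySem.Str.splitlines s).map (fun l => (PySem.Str.split? l " ").getD [])) 0) := by
    simp only [part2_alt]
    rw [pvRunsFold _ [] 0 0 0, List.nil_append]
    rw [pvFoldAppend pvRunPix pvEmitRun
          (fun acc r h1 h2 => pvEmitRun_eq acc r h1 h2) _ PySem.Set.empty hnd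
          (by intro a _ h; simp [PySem.Set.empty] at h)]
    rw [hpix]
    simp [PySem.Set.empty]
  rw [hA, hB]
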